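-- pv_equiv track=rewrite | github.com/nitin001singh/Data-Structure---Algorithm | Hashing/ZScalerOA.py | answer
-- ===== SOURCE A (Python) =====
-- def answer(nums):
--     hashmap = {}
--     for value in nums:
--         hashmap[value] = hashmap.get(value, 0) + 1
--
--     sortedMap = sorted(hashmap, reverse=True)
--
--     step  = 0
--     for key in  range(len(sortedMap)-1):
--         count = hashmap[sortedMap[key]]
--         step += count
--         hashmap[sortedMap[key+1]] += step
--         hashmap[sortedMap[key]] = 0
--
--     return step
-- ===== SOURCE B (Python) =====
-- def answer(nums):
--     freq = {}
--     for v in nums: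
--         freq[v] = freq.get(v, 0) + 1
--     result = 0
--     power = 1
--     for key in sorted(freq)[1:]:
--         result += freq[key] * power
--         power *= 2
--     return result
-- ===== Notes on version B (the rewrite author's own statement) =====
-- stated objective: simpler
-- what changed: B sweeps the distinct keys ascending with an explicit doubling power-of-two weight (result += freq[key]*power; power *= 2), instead of A's descending sweep that propagates a running step into the next bucket and zeroes entries of the mutated frequency map.
import Mathlib
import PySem

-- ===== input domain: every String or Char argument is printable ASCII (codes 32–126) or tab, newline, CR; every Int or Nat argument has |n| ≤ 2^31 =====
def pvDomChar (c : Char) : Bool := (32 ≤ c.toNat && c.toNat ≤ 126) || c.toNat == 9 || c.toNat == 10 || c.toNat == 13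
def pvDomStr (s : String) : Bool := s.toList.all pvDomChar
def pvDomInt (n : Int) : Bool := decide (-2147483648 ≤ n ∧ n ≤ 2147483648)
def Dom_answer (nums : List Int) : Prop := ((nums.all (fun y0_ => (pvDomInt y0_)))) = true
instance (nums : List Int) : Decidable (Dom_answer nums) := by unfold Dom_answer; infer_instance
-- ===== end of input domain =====

-- B replaces A's descending sweep (which propagates a running step into the next bucket of a
-- mutated frequency map) by an ascending sweep over the distinct keys with an explicit doubling
-- power-of-two weight; objective: simpler (no map mutation).

-- ===== PORT A =====
-- Dict lookups below use getD 0 / list indices use pyGetD 0: every key looked up is a key of the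
-- same dict and every index is in range, so no KeyError/IndexError can occur and the port is exact.
def answer (nums : List Int) : Int :=
  let hashmap : PySem.Dict Int Int :=
    nums.foldl (fun d value => d.insert value (d.getD value 0 + 1)) PySem.Dict.empty
  let sortedMap : List Int := PySem.List.sorted hashmap.keys (fun x => x) true
  let res :=
    (PySem.List.pyRange 0 ((sortedMap.length : Int) - 1) 1).foldl
      (fun (st : PySem.Dict Int Int × Int) key =>
        let count := st.1.getD (PySem.List.pyGetD sortedMap key 0) 0
        let step := st.2 + count
        let h1 := st.1.insert (PySem.List.pyGetD sortedMap (key + 1) 0)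
          (st.1.getD (PySem.List.pyGetD sortedMap (key + 1) 0) 0 + step)
        let h2 := h1.insert (PySem.List.pyGetD sortedMap key 0) 0
        (h2, step))
      (hashmap, 0)
  res.2

-- ===== PORT B =====
def answer_alt (nums : List Int) : Int :=
  let freq : PySem.Dict Int Int :=
    nums.foldl (fun d v => d.insert v (d.getD v 0 + 1)) PySem.Dict.empty
  let res :=
    (PySem.List.slice (PySem.List.sorted freq.keys (fun x => x) false) (some 1) none).foldl
      (fun (st : Int × Int) key => (st.1 + freq.getD key 0 * st.2, st.2 * 2))
      ((0 : Int), (1 : Int))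
  res.1

-- ===== PRECONDITION & SPEC =====
def Spec_answer (nums : List Int) (out : Int) : Prop := out = answer_alt nums
instance (nums : List Int) (out : Int) : Decidable (Spec_answer nums out) := by unfold Spec_answer; infer_instance

-- ===== CLAIM (what is proved, stated in full; the proofs are below) =====
def Claim_equal_answer : Prop := ∀ (nums : List Int), Dom_answer nums → Spec_answer nums (answer nums)

-- ===== LEMMAS AND PROOFS =====

-- A's running step propagated through the mutated map, as a pure recursion on the descending count list.
def stepRun : List Int → Int → Int
  | [], s => s
  | [_], s => s
  | c :: c' :: rest, s => stepRun ((c' + (s + c)) :: rest) (s + c)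
  termination_by l _ => l.length

lemma stepRun_cons_cons (c c' : Int) (l : List Int) (s : Int) :
    stepRun (c :: c' :: l) s = stepRun ((c' + (s + c)) :: l) (s + c) := by
  rw [stepRun]

-- B's weighted sum Σ cᵢ·2ⁱ.
def wsum : List Int → Int
  | [] => 0
  | c :: t => c + 2 * wsum t

lemma pyGetD_cons_add_one (xs : List Int) (x i d : Int) (h : 0 ≤ i) :
    PySem.List.pyGetD (x :: xs) (i + 1) d = PySem.List.pyGetD xs i d := by
  obtain ⟨n, rfl⟩ := Int.eq_ofNat_of_zero_le h
  have h1 : ((n:Int)+1).toNat = n+1 := by omega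
  by_cases hn : n < xs.length
  · simp [PySem.List.pyGetD, PySem.List.pyGet?, PySem.List.pyIdx?, hn, h1,
      (by exact_mod_cast hn : (n:Int) < xs.length),
      (by omega : ((n:Int)+1) < (xs.length:Int)+1)]
    rw [if_pos (by omega)]
    simp [hn]
  · simp [PySem.List.pyGetD, PySem.List.pyGet?, PySem.List.pyIdx?, h1]
    rw [if_pos (by omega)]
    simp [hn]

lemma pyRange_one_closed (a b : Int) :
    PySem.List.pyRange a b 1 = (List.range (b - a).toNat).map (fun k : Nat => a + (k : Int)) := by
  by_cases hab : a < b
  · simp only [PySem.List.pyRange, if_neg (by norm_num : ¬(1:Int) = 0),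
      if_pos (by norm_num : (0:Int) < 1), if_pos hab]
    norm_num
  · have h0 : (b - a).toNat = 0 := by omega
    simp [PySem.List.pyRange, hab, h0]

lemma wsum_append_singleton (t : List Int) (c : Int) :
    wsum (t ++ [c]) = wsum t + 2 ^ t.length * c := by
  induction t with
  | nil => simp [wsum]
  | cons x t ih => simp [wsum, ih, pow_succ]; ring

lemma hornerFold_eq_wsum_reverse (l : List Int) : ∀ a : Int,
    l.foldl (fun s c => 2 * s + c) a = a * 2 ^ l.length + wsum l.reverse := by
  induction l with
  | nil => intro a; simp [wsum]
  | cons c t ih =>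
    intro a
    simp only [List.foldl_cons, ih, List.reverse_cons, wsum_append_singleton,
      List.length_cons, List.length_reverse, pow_succ]
    ring

lemma powFold_eq_wsum (l : List Int) : ∀ r p : Int,
    (l.foldl (fun (st : Int × Int) c => (st.1 + c * st.2, st.2 * 2)) (r, p)).1
      = r + p * wsum l := by
  induction l with
  | nil => intro r p; simp [wsum]
  | cons c t ih => intro r p; simp only [List.foldl_cons, ih, wsum]; ring

lemma stepRun_eq_hornerFold (cs' : List Int) : ∀ c s : Int, cs' ≠ [] →
    stepRun (c :: cs') s = cs'.dropLast.foldl (fun a x => 2 * a + x) (s + c) := by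
  induction cs' with
  | nil => intro c s h; exact absurd rfl h
  | cons c' rest ih =>
    intro c s _
    cases rest with
    | nil => simp [stepRun]
    | cons x xs =>
      rw [stepRun, ih _ _ (by simp)]
      rw [show (c' :: x :: xs).dropLast = c' :: (x :: xs).dropLast from
        List.dropLast_cons_of_ne_nil (by simp)]
      simp only [List.foldl_cons]
      congr 1
      ring

lemma stepRun_zero (cs : List Int) :
    stepRun cs 0 = cs.dropLast.foldl (fun a x => 2 * a + x) 0 := by
  cases cs with
  | nil => simp [stepRun]
  | cons c cs' =>
    cases cs' with
    | nil => simp [stepRun]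
    | cons c' rest =>
      rw [stepRun_eq_hornerFold _ _ _ (by simp)]
      rw [show (c :: c' :: rest).dropLast = c :: (c' :: rest).dropLast from
        List.dropLast_cons_of_ne_nil (by simp)]
      simp only [List.foldl_cons]
      congr 1

-- The heart: A's index loop over the descending key list, with its mutated dict,
-- computes stepRun of the (current) counts.
lemma loopA (ds : List Int) (hnd : ds.Nodup) : ∀ (h : PySem.Dict Int Int) (s : Int),
    ((PySem.List.pyRange 0 ((ds.length : Int) - 1) 1).foldl
      (fun (st : PySem.Dict Int Int × Int) key =>
        ((st.1.insert (PySem.List.pyGetD ds (key + 1) 0)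
            (st.1.getD (PySem.List.pyGetD ds (key + 1) 0) 0
              + (st.2 + st.1.getD (PySem.List.pyGetD ds key 0) 0))).insert
            (PySem.List.pyGetD ds key 0) 0,
         st.2 + st.1.getD (PySem.List.pyGetD ds key 0) 0))
      (h, s)).2 = stepRun (ds.map (fun k => h.getD k 0)) s := by
  induction ds with
  | nil =>
    intro h s
    simp [PySem.List.pyRange, stepRun]
  | cons k t ih =>
    cases t with
    | nil =>
      intro h s
      simp [PySem.List.pyRange, stepRun]
    | cons k' rest =>
      intro h s
      have hkt : k ∉ k' :: rest := (List.nodup_cons.mp hnd).1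
      have hndt : (k' :: rest).Nodup := (List.nodup_cons.mp hnd).2
      have hkk' : k ≠ k' := fun e => hkt (e ▸ List.mem_cons_self ..)
      have hk'rest : k' ∉ rest := (List.nodup_cons.mp hndt).1
      rw [pyRange_one_closed]
      rw [show ((((k :: k' :: rest).length : Int) - 1) - 0).toNat = rest.length + 1 by
        simp]
      rw [List.range_succ_eq_map, List.map_cons, List.foldl_cons, List.map_map,
        List.foldl_map]
      have ihr : ∀ (h2 : PySem.Dict Int Int) (s2 : Int),
          (List.foldl
            (fun (st : PySem.Dict Int Int × Int) (j : Nat) =>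
              ((st.1.insert (PySem.List.pyGetD (k' :: rest) (0 + (j:Int) + 1) 0)
                  (st.1.getD (PySem.List.pyGetD (k' :: rest) (0 + (j:Int) + 1) 0) 0
                    + (st.2 + st.1.getD (PySem.List.pyGetD (k' :: rest) (0 + (j:Int)) 0) 0))).insert
                  (PySem.List.pyGetD (k' :: rest) (0 + (j:Int)) 0) 0,
               st.2 + st.1.getD (PySem.List.pyGetD (k' :: rest) (0 + (j:Int)) 0) 0))
            (h2, s2) (List.range rest.length)).2
          = stepRun ((k' :: rest).map (fun k => h2.getD k 0)) s2 := by
        intro h2 s2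
        have hh := ih hndt h2 s2
        rw [pyRange_one_closed,
          show ((((k' :: rest).length : Int) - 1) - 0).toNat = rest.length by simp,
          List.foldl_map] at hh
        exact hh
      have hcast : ∀ j : Nat, (0:Int) + ((Nat.succ j : Nat) : Int) = 0 + (j:Int) + 1 := by
        intro j; push_cast; ring
      have hsh1 : ∀ j : Nat, PySem.List.pyGetD (k :: k' :: rest) (0 + (j:Int) + 1) 0
          = PySem.List.pyGetD (k' :: rest) (0 + (j:Int)) 0 := fun j =>
        pyGetD_cons_add_one _ _ _ _ (by omega)
      have hsh2 : ∀ j : Nat, PySem.List.pyGetD (k :: k' :: rest) (0 + (j:Int) + 1 + 1) 0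
          = PySem.List.pyGetD (k' :: rest) (0 + (j:Int) + 1) 0 := fun j =>
        pyGetD_cons_add_one _ _ _ _ (by omega)
      have hz : PySem.List.pyGetD (k :: k' :: rest) (0 + ((0:Nat):Int)) 0 = k := by
        norm_num [PySem.List.pyGetD_zero_cons]
      have hz2 : PySem.List.pyGetD (k' :: rest) (0 + ((0:Nat):Int)) 0 = k' := by
        norm_num [PySem.List.pyGetD_zero_cons]
      simp only [Function.comp_apply, hcast, hsh2, hsh1, hz, hz2]
      rw [ihr]
      conv_rhs => rw [List.map_cons, List.map_cons, stepRun_cons_cons]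
      congr 1
      rw [List.map_cons]
      congr 1
      · rw [PySem.Dict.getD_insert, if_neg (Ne.symm hkk'), PySem.Dict.getD_insert_self]
      · apply List.map_congr_left
        intro x hx
        have hxk : x ≠ k := fun e => hkt (e ▸ List.mem_cons_of_mem _ hx)
        have hxk' : x ≠ k' := fun e => hk'rest (e ▸ hx)
        rw [PySem.Dict.getD_insert, if_neg hxk, PySem.Dict.getD_insert, if_neg hxk']

-- ===== VERDICT (by name: the statement is the Claim_ definition above) =====
theorem answer_spec : Claim_equal_answer := by
  unfold Claim_equal_answer
  intro nums _
  unfold Spec_answer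
  have hnd : (PySem.Dict.counter nums : PySem.Dict Int Int).keys.Nodup :=
    PySem.Dict.nodup_keys_counter nums
  have hascP : (PySem.List.sorted (PySem.Dict.counter nums : PySem.Dict Int Int).keys
      (fun x => x) false).Pairwise (· < ·) := by
    rw [PySem.Dict.keys_counter]
    exact PySem.List.sorted_ofList_pairwise_lt nums
  set asc := PySem.List.sorted (PySem.Dict.counter nums : PySem.Dict Int Int).keys
    (fun x => x) false with hasc
  set fcnt := fun k => (PySem.Dict.counter nums : PySem.Dict Int Int).getD k 0 with hfcnt
  have hperm : asc.Perm (PySem.Dict.counter nums).keys := PySem.List.sorted_perm _ _ _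
  have hdesc : PySem.List.sorted (PySem.Dict.counter nums).keys (fun x => x) true
      = asc.reverse :=
    PySem.List.sorted_rev_eq_of_perm_of_pairwise_gt _ _ _ (asc.reverse_perm.trans hperm)
      (by simpa [List.pairwise_reverse] using hascP)
  have hndasc : asc.Nodup := (hperm.symm).nodup hnd
  have hnddesc : asc.reverse.Nodup := by simpa using hndasc
  have hA : answer nums = stepRun (asc.reverse.map fcnt) 0 := by
    simp only [answer]
    rw [PySem.Dict.foldl_insert_getD_add_one_eq_counter, hdesc]
    exact loopA _ hnddesc _ 0
  have hA2 : answer nums = wsum ((asc.map fcnt).tail) := by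
    rw [hA, stepRun_zero, List.map_reverse, List.dropLast_reverse,
      hornerFold_eq_wsum_reverse]
    simp
  have hB : answer_alt nums = wsum ((asc.map fcnt).tail) := by
    simp only [answer_alt]
    rw [PySem.Dict.foldl_insert_getD_add_one_eq_counter, PySem.List.slice_from_one,
      ← List.foldl_map (f := fcnt)
        (g := fun (st : Int × Int) c => (st.1 + c * st.2, st.2 * 2)),
      powFold_eq_wsum, List.map_tail]
    ring
  rw [hA2, hB]
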